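-- pv_equiv track=rewrite | github.com/NBO2001/UFAM---Atividades | IC/Atividades/Lista_dominor/src/segunda_parte/__init__.py | pedra_maior
-- ===== SOURCE A (Python) =====
-- def soma_faces(soma_das_faces, pedra_element):
--
--     ld_a_pedra, ld_b_pedra = pedra_element
--
--     return (ld_a_pedra + ld_b_pedra) + soma_das_faces
--
-- def pedra_maior(mão_do_jogador):
--
--     maior_pedra = (0, 0)
--
--     for pedra in mão_do_jogador:
--
--         if soma_faces(0, pedra) > soma_faces(0, maior_pedra):
--             maior_pedra = pedra
--         elif soma_faces(0, pedra) < soma_faces(0, maior_pedra):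
--             maior_pedra = maior_pedra
--         else:
--             maior_pedra = pedra
--
--     return maior_pedra
-- ===== SOURCE B (Python) =====
-- def pedra_maior(mão_do_jogador):
--     # Sort all candidates (the (0,0) seed plus the hand) by face sum, stably;
--     # the last element is the max, and stability makes the later tied tile win,
--     # exactly A's tie rule.
--     candidatas = [(0, 0)] + list(mão_do_jogador)
--     return sorted(candidatas, key=lambda p: p[0] + p[1])[-1]
-- ===== Notes on version B (the rewrite author's own statement) =====
-- stated objective: alternative
-- what changed: Replaces A's single-pass compare-and-update scan (with a redundant three-way branch) by a stable sort of the (0,0)-seeded candidate list by face sum, returning its last element; stability reproduces A's later-tile-wins tie rule.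
import Mathlib
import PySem

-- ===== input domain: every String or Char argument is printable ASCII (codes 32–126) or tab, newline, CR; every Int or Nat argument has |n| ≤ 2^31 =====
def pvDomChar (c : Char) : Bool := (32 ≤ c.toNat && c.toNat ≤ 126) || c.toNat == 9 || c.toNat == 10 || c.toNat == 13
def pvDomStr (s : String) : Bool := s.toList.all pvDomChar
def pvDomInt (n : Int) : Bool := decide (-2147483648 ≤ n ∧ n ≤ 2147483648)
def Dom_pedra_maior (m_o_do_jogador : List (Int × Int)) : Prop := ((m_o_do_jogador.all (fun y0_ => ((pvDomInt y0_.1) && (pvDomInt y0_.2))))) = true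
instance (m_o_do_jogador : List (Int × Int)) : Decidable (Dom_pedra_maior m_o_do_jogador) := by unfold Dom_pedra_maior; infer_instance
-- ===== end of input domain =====

-- B replaces A's single-pass max-scan by a stable sort of the (0,0)-seeded candidate
-- list by face sum, taking the last element (alternative decomposition, same result).


-- ===== PORT A =====
def soma_faces (soma_das_faces : Int) (pedra_element : Int × Int) : Int :=
  (pedra_element.1 + pedra_element.2) + soma_das_faces

def pedra_maior (m_o_do_jogador : List (Int × Int)) : Int × Int :=
  m_o_do_jogador.foldl
    (fun maior_pedra pedra =>
      if soma_faces 0 pedra > soma_faces 0 maior_pedra then pedra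
      else if soma_faces 0 pedra < soma_faces 0 maior_pedra then maior_pedra
      else pedra)
    (0, 0)

-- ===== PORT B =====
def pedra_maior_alt (m_o_do_jogador : List (Int × Int)) : Int × Int :=
  let candidatas : List (Int × Int) := (0, 0) :: m_o_do_jogador
  -- candidatas[-1]: always in range since candidatas is nonempty
  PySem.List.pyGetD (PySem.List.sorted candidatas (fun p => p.1 + p.2) false) (-1) (0, 0)

-- ===== PRECONDITION & SPEC =====
def Spec_pedra_maior (m_o_do_jogador : List (Int × Int)) (out : Int × Int) : Prop := out = pedra_maior_alt m_o_do_jogador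
instance (m_o_do_jogador : List (Int × Int)) (out : Int × Int) : Decidable (Spec_pedra_maior m_o_do_jogador out) := by unfold Spec_pedra_maior; infer_instance

-- ===== CLAIM (what is proved, stated in full; the proofs are below) =====
def Claim_equal_pedra_maior : Prop := ∀ (m_o_do_jogador : List (Int × Int)), Dom_pedra_maior m_o_do_jogador → Spec_pedra_maior m_o_do_jogador (pedra_maior m_o_do_jogador)

-- ===== LEMMAS AND PROOFS =====

lemma pv_insertBy_ne_nil (bef : Int × Int → Int × Int → Bool) (x : Int × Int)
    (ys : List (Int × Int)) : PySem.List.insertBy bef x ys ≠ [] := by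
  have h := (PySem.List.insertBy_perm bef x ys).length_eq
  intro hnil
  simp [hnil] at h

-- the key of an element never exceeds the key of the last element of a key-sorted list
lemma pv_key_le_getLast? (y m : Int × Int) (ys : List (Int × Int))
    (hp : (y :: ys).Pairwise (fun a b => a.1 + a.2 ≤ b.1 + b.2))
    (h : (y :: ys).getLast? = some m) : y.1 + y.2 ≤ m.1 + m.2 := by
  have hm : m ∈ y :: ys := List.mem_of_getLast? h
  rcases List.mem_cons.mp hm with rfl | hm
  · exact le_refl _
  · exact (List.pairwise_cons.mp hp).1 m hm

-- inserting x into a key-sorted list moves the last element to x iff x's key is not smaller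
lemma pv_getLast?_insertBy (x m : Int × Int) (ys : List (Int × Int))
    (hp : ys.Pairwise (fun a b => a.1 + a.2 ≤ b.1 + b.2))
    (h : ys.getLast? = some m) :
    (PySem.List.insertBy (fun a b => decide (a.1 + a.2 < b.1 + b.2)) x ys).getLast? =
      some (if x.1 + x.2 < m.1 + m.2 then m else x) := by
  induction ys generalizing m with
  | nil => simp at h
  | cons y ys ih =>
    simp only [PySem.List.insertBy]
    split
    · rename_i hb
      have hxy : x.1 + x.2 < y.1 + y.2 := by simpa using hb
      have hym := pv_key_le_getLast? y m ys hp h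
      rw [List.getLast?_cons_cons, h, if_pos (lt_of_lt_of_le hxy hym)]
    · rename_i hb
      have hxy : ¬ x.1 + x.2 < y.1 + y.2 := by simpa using hb
      cases ys with
      | nil =>
        simp only [List.getLast?_singleton, Option.some.injEq] at h
        subst h
        simp [PySem.List.insertBy, if_neg hxy]
      | cons z zs =>
        obtain ⟨r, rs, hr⟩ : ∃ r rs,
            PySem.List.insertBy (fun a b => decide (a.1 + a.2 < b.1 + b.2)) x (z :: zs) = r :: rs := by
          cases hins : PySem.List.insertBy (fun a b => decide (a.1 + a.2 < b.1 + b.2)) x (z :: zs) with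
          | nil => exact absurd hins (pv_insertBy_ne_nil _ x _)
          | cons r rs => exact ⟨r, rs, rfl⟩
        rw [hr, List.getLast?_cons_cons, ← hr,
          ih m (List.pairwise_cons.mp hp).2 (by rw [← List.getLast?_cons_cons (a := y)]; exact h)]

-- folding insertions keeps track of the last element as A's running maximum does
lemma pv_foldl_insertBy_getLast? (l : List (Int × Int)) (ys : List (Int × Int)) (m : Int × Int)
    (hp : ys.Pairwise (fun a b => a.1 + a.2 ≤ b.1 + b.2))
    (h : ys.getLast? = some m) :
    (l.foldl (fun acc x => PySem.List.insertBy (fun a b => decide (a.1 + a.2 < b.1 + b.2)) x acc) ys).getLast? =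
      some (l.foldl (fun mm p => if p.1 + p.2 < mm.1 + mm.2 then mm else p) m) := by
  induction l generalizing ys m with
  | nil => exact h
  | cons p l ih =>
    simp only [List.foldl_cons]
    exact ih _ _ (PySem.List.insertBy_pairwise_le (fun q : Int × Int => q.1 + q.2) p ys hp)
      (pv_getLast?_insertBy p m ys hp h)

-- A's three-way branch equals B's "later tile wins on ties" step
lemma pv_step_eq (m p : Int × Int) :
    (if soma_faces 0 p > soma_faces 0 m then p
     else if soma_faces 0 p < soma_faces 0 m then m
     else p) = (if p.1 + p.2 < m.1 + m.2 then m else p) := by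
  simp only [soma_faces, gt_iff_lt]
  split_ifs <;> first | rfl | (exfalso; omega)

-- ===== VERDICT (by name: the statement is the Claim_ definition above) =====
theorem pedra_maior_spec : Claim_equal_pedra_maior := by
  intro l _
  unfold Spec_pedra_maior pedra_maior pedra_maior_alt
  show _ = PySem.List.pyGetD (PySem.List.sorted ((0, 0) :: l) (fun p => p.1 + p.2) false) (-1) (0, 0)
  have hne : PySem.List.sorted ((0, 0) :: l) (fun p : Int × Int => p.1 + p.2) false ≠ [] := by
    simp [PySem.List.sorted_eq_nil_iff]
  rw [PySem.List.pyGetD_neg_one _ _ hne]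
  have hfold := pv_foldl_insertBy_getLast? l [((0 : Int), (0 : Int))] ((0 : Int), (0 : Int))
    (by simp) rfl
  have hs : (PySem.List.sorted ((0, 0) :: l) (fun p : Int × Int => p.1 + p.2) false).getLast? =
      some (l.foldl (fun mm p => if p.1 + p.2 < mm.1 + mm.2 then mm else p) ((0 : Int), (0 : Int))) := by
    rw [PySem.List.sorted_eq_foldl_insertBy, List.foldl_cons]
    exact hfold
  rw [List.getLast?_eq_some_getLast hne] at hs
  have := Option.some.inj hs
  rw [this]
  exact List.foldl_ext _ _ _ (fun m p _ => pv_step_eq m p)
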